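-- pv_equiv track=rewrite | github.com/pypi-data/pypi-mirror-290 | packages/versification-utils/versification_utils-0.0.1-py3-none-any.whl/versification_utils/sniffing.py | get_last_verse_per_chapter
-- ===== SOURCE A (Python) =====
-- from typing import List, Union
--
-- def get_last_verse_per_chapter(verses: List[str]) -> List[str]:
--     last_verse_per_chapter_list = {}
--     for verse in verses:
--         book_ch = verse.split(":")[0]
--         if book_ch not in last_verse_per_chapter_list:
--             last_verse_per_chapter_list[book_ch] = verse
--         elif verse > last_verse_per_chapter_list[book_ch]:
--             last_verse_per_chapter_list[book_ch] = verse
--     return list(last_verse_per_chapter_list.values())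
-- ===== SOURCE B (Python) =====
-- def get_last_verse_per_chapter(verses):
--     groups = {}
--     for verse in verses:
--         groups.setdefault(verse.split(":")[0], []).append(verse)
--     return [max(group) for group in groups.values()]
-- ===== Notes on version B (the rewrite author's own statement) =====
-- stated objective: alternative
-- what changed: Replaces the interleaved running-max dict update with a two-phase group-then-reduce: one pass groups verses by their book:chapter prefix into lists, then the lexicographic max of each group is taken; output order and tie behaviour match because grouping preserves first-appearance order and max returns the first maximal element.
import Mathlib
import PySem

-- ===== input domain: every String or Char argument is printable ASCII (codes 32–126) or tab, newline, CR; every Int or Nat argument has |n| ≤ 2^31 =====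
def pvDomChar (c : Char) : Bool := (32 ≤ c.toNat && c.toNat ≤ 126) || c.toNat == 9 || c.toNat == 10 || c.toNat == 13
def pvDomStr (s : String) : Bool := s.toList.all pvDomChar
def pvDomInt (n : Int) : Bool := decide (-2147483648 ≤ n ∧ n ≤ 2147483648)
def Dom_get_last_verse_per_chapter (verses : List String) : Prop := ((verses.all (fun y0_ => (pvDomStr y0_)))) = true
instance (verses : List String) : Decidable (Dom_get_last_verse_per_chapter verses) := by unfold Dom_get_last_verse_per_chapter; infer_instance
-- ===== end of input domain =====

-- B replaces A's interleaved running-max dict update by a two-phase group-by-prefix then max-per-group pass; same cost, alternative decomposition.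

-- ===== PORT A =====
-- verse.split(":")[0]: ':' is a nonempty separator so split? returns some, and the result is
-- never empty, so index [0] is exactly headD.
def get_last_verse_per_chapter (verses : List String) : List String :=
  (verses.foldl (fun d verse =>
      let book_ch := ((PySem.Str.split? verse ":").getD []).headD ""
      if d.contains book_ch = false then d.insert book_ch verse
      else if d.getD book_ch "" < verse then d.insert book_ch verse
      else d)
    PySem.Dict.empty).values

-- ===== PORT B =====
-- groups.setdefault(k, []).append(verse) is d[k] = d.get(k, []) + [verse] = Dict.modify;
-- max(group) on a nonempty list of strings is PySem.List.max? with the identity key.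
def get_last_verse_per_chapter_alt (verses : List String) : List String :=
  ((verses.foldl (fun d verse =>
      d.modify (((PySem.Str.split? verse ":").getD []).headD "") [] (fun g => g ++ [verse]))
    PySem.Dict.empty).values).map
    (fun group => (PySem.List.max? group (fun y => y)).getD "")

-- ===== PRECONDITION & SPEC =====
def Spec_get_last_verse_per_chapter (verses : List String) (out : List String) : Prop := out = get_last_verse_per_chapter_alt verses
instance (verses : List String) (out : List String) : Decidable (Spec_get_last_verse_per_chapter verses out) := by unfold Spec_get_last_verse_per_chapter; infer_instance

-- ===== CLAIM (what is proved, stated in full; the proofs are below) =====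
def Claim_equal_get_last_verse_per_chapter : Prop := ∀ (verses : List String), Dom_get_last_verse_per_chapter verses → Spec_get_last_verse_per_chapter verses (get_last_verse_per_chapter verses)

-- ===== LEMMAS AND PROOFS =====

-- "max(group)" for proofs
def pvMax (g : List String) : String := (PySem.List.max? g (fun y => y)).getD ""

lemma pvMax_singleton (v : String) : pvMax [v] = v := by
  simp [pvMax, PySem.List.max?_id_cons]

lemma max_eq_ite (a b : String) : max a b = if a < b then b else a := by
  rcases lt_trichotomy a b with h|h|h
  · simp [max_eq_right h.le, h]
  · simp [h]
  · simp [max_eq_left h.le, not_lt_of_gt h]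

lemma pvMax_append (g : List String) (v : String) (hg : g ≠ []) :
    pvMax (g ++ [v]) = if pvMax g < v then v else pvMax g := by
  cases g with
  | nil => exact absurd rfl hg
  | cons x t =>
    simp only [pvMax, List.cons_append, PySem.List.max?_id_cons, Option.getD_some,
      List.foldl_append, List.foldl_cons, List.foldl_nil]
    exact max_eq_ite _ v

-- the main loop invariant: A's dict is B's grouping dict with each group replaced by its max
lemma loop_invariant (verses : List String)
    (dA : PySem.Dict String String) (dB : PySem.Dict String (List String))
    (hnd : dB.keys.Nodup)
    (hne : ∀ p ∈ dB.items, p.2 ≠ [])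
    (hinv : dA.items = dB.items.map (fun p => (p.1, pvMax p.2))) :
    (verses.foldl (fun d verse =>
      let book_ch := ((PySem.Str.split? verse ":").getD []).headD ""
      if d.contains book_ch = false then d.insert book_ch verse
      else if d.getD book_ch "" < verse then d.insert book_ch verse
      else d) dA).items
    = ((verses.foldl (fun d verse =>
        d.modify (((PySem.Str.split? verse ":").getD []).headD "") [] (fun g => g ++ [verse]))
        dB).items).map (fun p => (p.1, pvMax p.2)) := by
  induction verses generalizing dA dB with
  | nil => simpa using hinv
  | cons v vs ih =>
    simp only [List.foldl_cons]
    set k := ((PySem.Str.split? v ":").getD []).headD "" with hk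
    have hkeys : dA.keys = dB.keys := by
      simp only [PySem.Dict.keys, hinv, List.map_map]
      rfl
    have hcontains : dA.contains k = dB.contains k := by
      rw [PySem.Dict.contains_eq_decide_mem_keys, PySem.Dict.contains_eq_decide_mem_keys, hkeys]
    have hmodify : dB.modify k [] (fun g => g ++ [v]) = dB.insert k (dB.getD k [] ++ [v]) := rfl
    by_cases hc : dB.contains k = true
    · -- key already present with a nonempty group g
      obtain ⟨g, hg⟩ : ∃ g, dB.get? k = some g := by
        have := PySem.Dict.contains_eq_isSome_get? (d := dB) (k := k)
        rw [hc] at this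
        exact Option.isSome_iff_exists.mp this.symm
      have hgmem : (k, g) ∈ dB.items := PySem.Dict.mem_items_of_get?_eq_some _ hg
      have hgne : g ≠ [] := hne _ hgmem
      have hgetD : dB.getD k [] = g := PySem.Dict.getD_of_get?_eq_some _ [] hg
      have hAnd : dA.keys.Nodup := hkeys ▸ hnd
      have hAget : dA.getD k "" = pvMax g := by
        have : (k, pvMax g) ∈ dA.items := by
          rw [hinv]; exact List.mem_map.mpr ⟨(k, g), hgmem, rfl⟩
        exact PySem.Dict.getD_of_mem_items _ this hAnd ""
      -- B's step: overwrite in place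
      have hBitems : (dB.modify k [] (fun g => g ++ [v])).items
          = dB.items.map (fun p => if p.1 == k then (k, g ++ [v]) else p) := by
        rw [hmodify, hgetD, PySem.Dict.items_insert_of_contains _ _ hc]
      -- uniqueness of the group at key k
      have huniq : ∀ p ∈ dB.items, p.1 = k → p.2 = g := by
        intro p hp hpk
        have : dB.get? p.1 = some p.2 := PySem.Dict.get?_of_mem_items _ hp hnd
        rw [hpk, hg] at this
        exact (Option.some.injEq _ _).mp this.symm
      apply ih
      · rw [hmodify]; exact PySem.Dict.nodup_keys_insert _ _ _ hnd
      · intro p hp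
        rw [hmodify] at hp
        rcases (PySem.Dict.mem_items_insert _ _ _ _).mp hp with h | ⟨h, _⟩
        · subst h; simp
        · exact hne _ h
      · -- the stepped invariant
        have hcA : dA.contains k = true := by rw [hcontains]; exact hc
        simp only [hcA, Bool.true_eq_false, if_false, hAget]
        rw [hBitems, List.map_map]
        by_cases hlt : pvMax g < v
        · rw [if_pos hlt, PySem.Dict.items_insert_of_contains _ _ hcA, hinv, List.map_map]
          apply List.map_congr_left
          intro p hp
          simp only [Function.comp]
          by_cases hpk : p.1 = k
          · simp [hpk, pvMax_append g v hgne, hlt]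
          · simp [hpk, beq_iff_eq]
        · rw [if_neg hlt, hinv]
          apply List.map_congr_left
          intro p hp
          simp only [Function.comp]
          by_cases hpk : p.1 = k
          · have hpg : p.2 = g := huniq p hp hpk
            simp [hpk, hpg, pvMax_append g v hgne, hlt]
          · simp [hpk, beq_iff_eq]
    · -- fresh key: both sides append
      have hc' : dB.contains k = false := by
        cases h : dB.contains k
        · rfl
        · exact absurd h hc
      apply ih
      · rw [hmodify]; exact PySem.Dict.nodup_keys_insert _ _ _ hnd
      · intro p hp
        rw [hmodify] at hp
        rcases (PySem.Dict.mem_items_insert _ _ _ _).mp hp with h | ⟨h, _⟩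
        · subst h
          rw [PySem.Dict.getD_of_not_contains _ _ hc']
          simp
        · exact hne _ h
      · have hcA' : dA.contains k = false := by rw [hcontains]; exact hc'
        rw [hmodify, PySem.Dict.getD_of_not_contains _ _ hc',
          PySem.Dict.items_insert_of_not_contains _ _ hc']
        simp only [hcA', if_true]
        rw [PySem.Dict.items_insert_of_not_contains _ _ hcA', hinv, List.map_append]
        simp [pvMax_singleton]

-- ===== VERDICT (by name: the statement is the Claim_ definition above) =====
theorem get_last_verse_per_chapter_spec : Claim_equal_get_last_verse_per_chapter := by
  intro verses _
  unfold Spec_get_last_verse_per_chapter get_last_verse_per_chapter get_last_verse_per_chapter_alt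
  have h := loop_invariant verses PySem.Dict.empty PySem.Dict.empty
    (by simp) (by intro p hp; simp [PySem.Dict.empty] at hp)
    (by simp [PySem.Dict.empty])
  simp only [PySem.Dict.values, h, List.map_map]
  rfl
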